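-- pv_equiv track=rewrite | github.com/Albertree/SOAR-ARC-test | procedural_memory/base_rules/structure/quadrant_shape_swap.py | _find_separators
-- ===== SOURCE A (Python) =====
-- def _find_separators(grid):
--     """Find separator rows and columns (all zeros)."""
--     h = len(grid)
--     w = len(grid[0]) if grid else 0
--
--     sep_rows = set()
--     for r in range(h):
--         if all(grid[r][c] == 0 for c in range(w)):
--             sep_rows.add(r)
--
--     sep_cols = set()
--     for c in range(w):
--         if all(grid[r][c] == 0 for r in range(h)):
--             sep_cols.add(c)
--
--     return sep_rows, sep_cols
-- ===== SOURCE B (Python) =====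
-- def _find_separators(grid):
--     """Find separator rows and columns (all zeros) in one pass."""
--     h = len(grid)
--     w = len(grid[0]) if grid else 0
--
--     nonzero_rows = set()
--     nonzero_cols = set()
--     for r in range(h):
--         for c in range(w):
--             if grid[r][c] != 0:
--                 nonzero_rows.add(r)
--                 nonzero_cols.add(c)
--
--     return set(range(h)) - nonzero_rows, set(range(w)) - nonzero_cols
-- ===== Notes on version B (the rewrite author's own statement) =====
-- stated objective: alternative
-- what changed: Replaces A's two separate all-zero scans (one per row, one per column, each re-reading the grid) with a single traversal of the grid that records the nonzero rows/columns in two sets, then returns the set complements of range(h)/range(w).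
-- outside the precondition, e.g. on _find_separators([[1, 2], [3]]): A returns (set(), set()), B raises IndexError
import Mathlib
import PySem

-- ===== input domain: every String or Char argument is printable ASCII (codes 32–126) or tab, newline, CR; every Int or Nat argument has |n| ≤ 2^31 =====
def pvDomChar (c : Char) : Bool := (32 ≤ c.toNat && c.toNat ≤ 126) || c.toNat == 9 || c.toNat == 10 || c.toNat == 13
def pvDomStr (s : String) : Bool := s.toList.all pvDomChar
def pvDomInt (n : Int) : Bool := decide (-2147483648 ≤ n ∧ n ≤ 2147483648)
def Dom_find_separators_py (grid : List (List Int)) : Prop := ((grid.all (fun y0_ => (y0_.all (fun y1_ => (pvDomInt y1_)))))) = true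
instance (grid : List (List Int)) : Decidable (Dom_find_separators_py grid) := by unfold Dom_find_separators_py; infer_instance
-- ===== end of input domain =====

-- B replaces A's two separate all-zero scans by one traversal recording nonzero rows/cols
-- plus a set complement (objective: alternative decomposition, same cost).

-- ===== PORT A =====
-- grid[r][c]: pyGetD with a defaulted row/cell is exact under Pre_ (all indices in range; outside Pre_ Python raises IndexError).
def find_separators_py (grid : List (List Int)) : List Int × List Int :=
  let h : Int := grid.length
  let w : Int := ((grid.headD []).length : Int)  -- len(grid[0]) if grid else 0
  let sep_rows : PySem.Set Int :=
    (PySem.List.pyRange 0 h 1).foldl (fun s r =>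
      if (PySem.List.pyRange 0 w 1).all (fun c =>
          PySem.List.pyGetD (PySem.List.pyGetD grid r []) c 1 == 0)
      then PySem.Set.add s r else s) PySem.Set.empty
  let sep_cols : PySem.Set Int :=
    (PySem.List.pyRange 0 w 1).foldl (fun s c =>
      if (PySem.List.pyRange 0 h 1).all (fun r =>
          PySem.List.pyGetD (PySem.List.pyGetD grid r []) c 1 == 0)
      then PySem.Set.add s c else s) PySem.Set.empty
  (sep_rows, sep_cols)

-- ===== PORT B =====
def find_separators_py_alt (grid : List (List Int)) : List Int × List Int :=
  let h : Int := grid.length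
  let w : Int := ((grid.headD []).length : Int)  -- len(grid[0]) if grid else 0
  let nz : PySem.Set Int × PySem.Set Int :=
    (PySem.List.pyRange 0 h 1).foldl (fun p r =>
      (PySem.List.pyRange 0 w 1).foldl (fun q c =>
        if PySem.List.pyGetD (PySem.List.pyGetD grid r []) c 1 != 0
        then (PySem.Set.add q.1 r, PySem.Set.add q.2 c) else q) p)
      (PySem.Set.empty, PySem.Set.empty)
  (PySem.Set.diff (PySem.Set.ofList (PySem.List.pyRange 0 h 1)) nz.1,
   PySem.Set.diff (PySem.Set.ofList (PySem.List.pyRange 0 w 1)) nz.2)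

-- ===== PRECONDITION & SPEC =====
-- Pre_ excludes jagged grids (a row shorter than the first row): there Python B always raises
-- IndexError while Python A raises or returns depending on all()'s accidental short-circuit.
def Pre_find_separators_py (grid : List (List Int)) : Prop :=
  ∀ row ∈ grid, (grid.headD []).length ≤ row.length
instance (grid : List (List Int)) : Decidable (Pre_find_separators_py grid) := by
  unfold Pre_find_separators_py; infer_instance
def pvWitness_find_separators_py : List (List Int) := [[0, 1, 0], [0, 0, 0], [0, 2, 0]]

def Spec_find_separators_py (grid : List (List Int)) (out : List Int × List Int) : Prop := out = find_separators_py_alt grid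
instance (grid : List (List Int)) (out : List Int × List Int) : Decidable (Spec_find_separators_py grid out) := by unfold Spec_find_separators_py; infer_instance

-- ===== CLAIM (what is proved, stated in full; the proofs are below) =====
def Claim_equal_find_separators_py : Prop := ∀ (grid : List (List Int)), Dom_find_separators_py grid → Pre_find_separators_py grid → Spec_find_separators_py grid (find_separators_py grid)

-- ===== LEMMAS AND PROOFS =====

-- the cell read both ports perform
def pvCell (grid : List (List Int)) (r c : Int) : Int :=
  PySem.List.pyGetD (PySem.List.pyGetD grid r []) c 1

-- A's accumulation: "if p r: s.add(r)" over a Nodup list disjoint from init is init ++ filter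
lemma pv_foldl_add_if_eq_filter (p : Int → Bool) :
    ∀ (l : List Int) (init : List Int), l.Nodup → (∀ x ∈ l, x ∉ init) →
      l.foldl (fun s r => if p r then PySem.Set.add s r else s) init = init ++ l.filter p := by
  intro l
  induction l with
  | nil => intro init _ _; simp
  | cons x xs ih =>
    intro init hnd hdis
    have hx : x ∉ init := hdis x (by simp)
    have hnd' := List.nodup_cons.mp hnd
    by_cases hp : p x = true
    · rw [List.foldl_cons, if_pos hp, PySem.Set.add_of_not_mem hx,
        ih (init ++ [x]) hnd'.2 (by
          intro y hy
          simp only [List.mem_append, List.mem_singleton]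
          rintro (h | rfl)
          · exact hdis y (by simp [hy]) h
          · exact hnd'.1 hy)]
      simp [hp]
    · rw [List.foldl_cons, if_neg hp,
        ih init hnd'.2 (fun y hy => hdis y (by simp [hy]))]
      simp [hp]

-- membership in the two components of B's inner loop
lemma pv_inner_fst (d : Int → Int → Bool) (r x : Int) :
    ∀ (cols : List Int) (q : PySem.Set Int × PySem.Set Int),
      (x ∈ (cols.foldl (fun q c => if d r c then (PySem.Set.add q.1 r, PySem.Set.add q.2 c) else q) q).1
        ↔ x ∈ q.1 ∨ (x = r ∧ ∃ c ∈ cols, d r c)) := by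
  intro cols
  induction cols with
  | nil => intro q; simp
  | cons c cs ih =>
    intro q
    by_cases hd : d r c = true
    · rw [List.foldl_cons, if_pos hd, ih]
      simp only [PySem.Set.mem_add, List.mem_cons]
      constructor
      · rintro ((h | rfl) | ⟨rfl, c', hc', hd'⟩)
        · exact Or.inl h
        · exact Or.inr ⟨rfl, c, Or.inl rfl, hd⟩
        · exact Or.inr ⟨rfl, c', Or.inr hc', hd'⟩
      · rintro (h | ⟨rfl, c', (rfl | hc'), hd'⟩)
        · exact Or.inl (Or.inl h)
        · exact Or.inl (Or.inr rfl)
        · exact Or.inr ⟨rfl, c', hc', hd'⟩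
    · rw [List.foldl_cons, if_neg hd, ih]
      simp only [List.mem_cons]
      constructor
      · rintro (h | ⟨rfl, c', hc', hd'⟩)
        · exact Or.inl h
        · exact Or.inr ⟨rfl, c', Or.inr hc', hd'⟩
      · rintro (h | ⟨rfl, c', (rfl | hc'), hd'⟩)
        · exact Or.inl h
        · exact absurd hd' hd
        · exact Or.inr ⟨rfl, c', hc', hd'⟩

lemma pv_inner_snd (d : Int → Int → Bool) (r x : Int) :
    ∀ (cols : List Int) (q : PySem.Set Int × PySem.Set Int),
      (x ∈ (cols.foldl (fun q c => if d r c then (PySem.Set.add q.1 r, PySem.Set.add q.2 c) else q) q).2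
        ↔ x ∈ q.2 ∨ (x ∈ cols ∧ d r x)) := by
  intro cols
  induction cols with
  | nil => intro q; simp
  | cons c cs ih =>
    intro q
    by_cases hd : d r c = true
    · rw [List.foldl_cons, if_pos hd, ih]
      simp only [PySem.Set.mem_add, List.mem_cons]
      constructor
      · rintro ((h | rfl) | ⟨hc, hdx⟩)
        · exact Or.inl h
        · exact Or.inr ⟨Or.inl rfl, hd⟩
        · exact Or.inr ⟨Or.inr hc, hdx⟩
      · rintro (h | ⟨rfl | hc, hdx⟩)
        · exact Or.inl (Or.inl h)
        · exact Or.inl (Or.inr rfl)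
        · exact Or.inr ⟨hc, hdx⟩
    · rw [List.foldl_cons, if_neg hd, ih]
      simp only [List.mem_cons]
      constructor
      · rintro (h | ⟨hc, hdx⟩)
        · exact Or.inl h
        · exact Or.inr ⟨Or.inr hc, hdx⟩
      · rintro (h | ⟨rfl | hc, hdx⟩)
        · exact Or.inl h
        · exact absurd hdx hd
        · exact Or.inr ⟨hc, hdx⟩

-- membership in the two components of B's double loop
lemma pv_outer_fst (d : Int → Int → Bool) (cols : List Int) (x : Int) :
    ∀ (rows : List Int) (p : PySem.Set Int × PySem.Set Int),
      (x ∈ (rows.foldl (fun p r => cols.foldl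
              (fun q c => if d r c then (PySem.Set.add q.1 r, PySem.Set.add q.2 c) else q) p) p).1
        ↔ x ∈ p.1 ∨ (x ∈ rows ∧ ∃ c ∈ cols, d x c)) := by
  intro rows
  induction rows with
  | nil => intro p; simp
  | cons r rs ih =>
    intro p
    rw [List.foldl_cons, ih, pv_inner_fst]
    simp only [List.mem_cons]
    constructor
    · rintro ((h | ⟨rfl, hc⟩) | ⟨hr, hc⟩)
      · exact Or.inl h
      · exact Or.inr ⟨Or.inl rfl, hc⟩
      · exact Or.inr ⟨Or.inr hr, hc⟩
    · rintro (h | ⟨rfl | hr, hc⟩)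
      · exact Or.inl (Or.inl h)
      · exact Or.inl (Or.inr ⟨rfl, hc⟩)
      · exact Or.inr ⟨hr, hc⟩

lemma pv_outer_snd (d : Int → Int → Bool) (cols : List Int) (x : Int) :
    ∀ (rows : List Int) (p : PySem.Set Int × PySem.Set Int),
      (x ∈ (rows.foldl (fun p r => cols.foldl
              (fun q c => if d r c then (PySem.Set.add q.1 r, PySem.Set.add q.2 c) else q) p) p).2
        ↔ x ∈ p.2 ∨ (x ∈ cols ∧ ∃ r ∈ rows, d r x)) := by
  intro rows
  induction rows with
  | nil => intro p; simp
  | cons r rs ih =>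
    intro p
    rw [List.foldl_cons, ih, pv_inner_snd]
    simp only [List.mem_cons]
    constructor
    · rintro ((h | ⟨hc, hdx⟩) | ⟨hc, r', hr', hd'⟩)
      · exact Or.inl h
      · exact Or.inr ⟨hc, r, Or.inl rfl, hdx⟩
      · exact Or.inr ⟨hc, r', Or.inr hr', hd'⟩
    · rintro (h | ⟨hc, r', (rfl | hr'), hd'⟩)
      · exact Or.inl (Or.inl h)
      · exact Or.inl (Or.inr ⟨hc, hd'⟩)
      · exact Or.inr ⟨hc, r', hr', hd'⟩

lemma pv_diff_eq_filter (s t : List Int) :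
    PySem.Set.diff s t = s.filter (fun x => !(PySem.Set.contains t x)) := by
  simp [PySem.Set.diff]

-- ===== VERDICT (by name: the statement is the Claim_ definition above) =====
theorem find_separators_py_spec : Claim_equal_find_separators_py := by
  intro grid _ _
  unfold Spec_find_separators_py find_separators_py find_separators_py_alt
  simp only []
  set h : Int := (grid.length : Int) with hh
  set w : Int := ((grid.headD []).length : Int) with hw
  set rows := PySem.List.pyRange 0 h 1 with hrows
  set cols := PySem.List.pyRange 0 w 1 with hcols
  have hnR : rows.Nodup := PySem.List.nodup_pyRange_one 0 h
  have hnC : cols.Nodup := PySem.List.nodup_pyRange_one 0 w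
  -- A's two components as filters
  rw [pv_foldl_add_if_eq_filter _ rows PySem.Set.empty hnR (by intro x _ hx; simp [PySem.Set.empty] at hx)]
  rw [pv_foldl_add_if_eq_filter _ cols PySem.Set.empty hnC (by intro x _ hx; simp [PySem.Set.empty] at hx)]
  -- B's two components as filters
  rw [PySem.Set.ofList_eq_self_of_nodup rows hnR, PySem.Set.ofList_eq_self_of_nodup cols hnC,
    pv_diff_eq_filter, pv_diff_eq_filter]
  simp only [PySem.Set.empty, List.nil_append]
  refine Prod.ext_iff.mpr ⟨?_, ?_⟩
  · apply List.filter_congr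
    intro r hr
    have hmem := pv_outer_fst (fun r c => PySem.List.pyGetD (PySem.List.pyGetD grid r []) c 1 != 0)
      cols r rows (([] : List Int), ([] : List Int))
    simp only [List.not_mem_nil, false_or] at hmem
    by_cases hz : ∀ c ∈ cols, (PySem.List.pyGetD (PySem.List.pyGetD grid r []) c 1 == 0) = true
    · have hnotin : r ∉ (rows.foldl (fun p r => cols.foldl
          (fun q c => if PySem.List.pyGetD (PySem.List.pyGetD grid r []) c 1 != 0
            then (PySem.Set.add q.1 r, PySem.Set.add q.2 c) else q) p)
          (([] : List Int), ([] : List Int))).1 := by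
        intro hin
        rcases hmem.mp hin with ⟨_, c, hc, hne⟩
        have := hz c hc
        simp_all
      rw [PySem.Set.contains_eq_listContains, List.contains_eq_mem, decide_eq_false hnotin]
      simp only [Bool.not_false]
      exact List.all_eq_true.mpr hz
    · push Not at hz
      obtain ⟨c, hc, hne⟩ := hz
      have hin : r ∈ (rows.foldl (fun p r => cols.foldl
          (fun q c => if PySem.List.pyGetD (PySem.List.pyGetD grid r []) c 1 != 0
            then (PySem.Set.add q.1 r, PySem.Set.add q.2 c) else q) p)
          (([] : List Int), ([] : List Int))).1 :=
        hmem.mpr ⟨hr, c, hc, by simp_all⟩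
      rw [PySem.Set.contains_eq_listContains, List.contains_eq_mem, decide_eq_true hin]
      simp only [Bool.not_true]
      exact List.all_eq_false.mpr ⟨c, hc, by simp_all⟩
  · apply List.filter_congr
    intro c hc
    have hmem := pv_outer_snd (fun r c => PySem.List.pyGetD (PySem.List.pyGetD grid r []) c 1 != 0)
      cols c rows (([] : List Int), ([] : List Int))
    simp only [List.not_mem_nil, false_or] at hmem
    by_cases hz : ∀ r ∈ rows, (PySem.List.pyGetD (PySem.List.pyGetD grid r []) c 1 == 0) = true
    · have hnotin : c ∉ (rows.foldl (fun p r => cols.foldl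
          (fun q c => if PySem.List.pyGetD (PySem.List.pyGetD grid r []) c 1 != 0
            then (PySem.Set.add q.1 r, PySem.Set.add q.2 c) else q) p)
          (([] : List Int), ([] : List Int))).2 := by
        intro hin
        rcases hmem.mp hin with ⟨_, r, hr, hne⟩
        have := hz r hr
        simp_all
      rw [PySem.Set.contains_eq_listContains, List.contains_eq_mem, decide_eq_false hnotin]
      simp only [Bool.not_false]
      exact List.all_eq_true.mpr hz
    · push Not at hz
      obtain ⟨r, hr, hne⟩ := hz
      have hin : c ∈ (rows.foldl (fun p r => cols.foldl
          (fun q c => if PySem.List.pyGetD (PySem.List.pyGetD grid r []) c 1 != 0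
            then (PySem.Set.add q.1 r, PySem.Set.add q.2 c) else q) p)
          (([] : List Int), ([] : List Int))).2 :=
        hmem.mpr ⟨hc, r, hr, by simp_all⟩
      rw [PySem.Set.contains_eq_listContains, List.contains_eq_mem, decide_eq_true hin]
      simp only [Bool.not_true]
      exact List.all_eq_false.mpr ⟨r, hr, by simp_all⟩
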